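-- pv_equiv track=rewrite | github.com/Amiharbi/Python_Project | project.py | binary_search_and_check_vowel
-- ===== SOURCE A (Python) =====
-- def has_vowel(word):
--       """
--       Checks if a given word contains any vowels (case-insensitive).
--
--       Args:
--         word: The string to check.
--
--       True will be returned if the word contains a vowel, False otherwise.
--       """
--       vowels = "aeiou" or "AEIOU"
--       for char in word.lower():
--           if char in vowels:
--               return True
--       return False
--
-- def binary_search_and_check_vowel(sorted_word_list, target_word):
--   """
--   Here, we are performing a binary search on a sorted list of words to find a wanted word
--   then check if it has a vowel.
--
--   Args:
--     sorted_word_list: A list of words sorted in alphabetical order.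
--     target_word: The word to search for.
--   """
--
--   low = 0
--   high = len(sorted_word_list) - 1
--
--   while low <= high:
--     mid = (low + high) // 2
--     stranger = sorted_word_list[mid]
--
--     if stranger == target_word:
--       # Word is found, now check for a vowel
--       return (True, has_vowel(stranger))
--
--     if stranger < target_word:
--       # The word is in the right half
--       low = mid + 1
--     else:
--       # The word is in the left half
--       high = mid - 1
--
--   # The word was not found in the list
--   return (False, None)
-- ===== SOURCE B (Python) =====
-- def has_vowel(word):
--     return any(c in "aeiou" for c in word.lower())
--
--
-- def _find(lst, target, low, high):
--     if low > high:
--         return None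
--     mid = (low + high) // 2
--     w = lst[mid]
--     if w == target:
--         return w
--     if w < target:
--         return _find(lst, target, mid + 1, high)
--     return _find(lst, target, low, mid - 1)
--
--
-- def binary_search_and_check_vowel(sorted_word_list, target_word):
--     w = _find(sorted_word_list, target_word, 0, len(sorted_word_list) - 1)
--     if w is None:
--         return (False, None)
--     return (True, has_vowel(w))
-- ===== Notes on version B (the rewrite author's own statement) =====
-- stated objective: alternative
-- what changed: The while-loop that mixes searching and vowel-checking is replaced by a recursive binary-search helper that returns the found word (or None), with the vowel check applied afterwards; has_vowel becomes a one-line any() over the lowered word.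
import Mathlib
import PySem

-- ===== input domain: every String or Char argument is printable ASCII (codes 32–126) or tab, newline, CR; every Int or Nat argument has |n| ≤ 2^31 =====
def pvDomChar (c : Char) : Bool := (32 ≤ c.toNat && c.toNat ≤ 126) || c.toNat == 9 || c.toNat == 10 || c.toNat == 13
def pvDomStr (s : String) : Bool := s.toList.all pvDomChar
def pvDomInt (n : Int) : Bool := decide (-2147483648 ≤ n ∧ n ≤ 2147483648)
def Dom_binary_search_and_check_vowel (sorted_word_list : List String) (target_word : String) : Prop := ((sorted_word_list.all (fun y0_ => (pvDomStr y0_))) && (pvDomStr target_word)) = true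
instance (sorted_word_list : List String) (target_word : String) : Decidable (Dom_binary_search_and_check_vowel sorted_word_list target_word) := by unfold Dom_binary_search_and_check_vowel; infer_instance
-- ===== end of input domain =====

-- B: the search loop is decomposed into a recursive find-the-word helper plus a separate
-- vowel check on its result (same probes, same answers); alternative decomposition, not faster.


-- ===== PORT A =====

-- A's has_vowel: for char in word.lower(): if char in vowels: return True; return False
def hasVowelLoopA : List Char → Bool
  | [] => false
  | c :: cs => if c ∈ "aeiou".toList then true else hasVowelLoopA cs

def hasVowelA (word : String) : Bool := hasVowelLoopA (PySem.Str.lower word).toList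

-- A's while loop over (low, high); sorted_word_list[mid] via pyGetD (mid always in range on A's calls)
def bscvLoopA (xs : List String) (tw : String) (low high : Int) : Bool × Option Bool :=
  if h : low ≤ high then
    let mid := PySem.Int.floordiv (low + high) 2
    let stranger := PySem.List.pyGetD xs mid ""
    if stranger == tw then (true, hasVowelA stranger)
    else if stranger < tw then bscvLoopA xs tw (mid + 1) high
    else bscvLoopA xs tw low (mid - 1)
  else (false, none)
termination_by (high + 1 - low).toNat
decreasing_by
  · have := PySem.Int.floordiv_two_mid_bounds h; omega
  · have := PySem.Int.floordiv_two_mid_bounds h; omega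

def binary_search_and_check_vowel (sorted_word_list : List String) (target_word : String) :
    Bool × Option Bool :=
  bscvLoopA sorted_word_list target_word 0 ((sorted_word_list.length : Int) - 1)

-- ===== PORT B =====

-- B's has_vowel: any(c in "aeiou" for c in word.lower())
def hasVowelB (word : String) : Bool :=
  (PySem.Str.lower word).toList.any (fun c => decide (c ∈ "aeiou".toList))

-- B's _find: recursive binary search returning the found word (None if absent)
def bsFindB (xs : List String) (tw : String) (low high : Int) : Option String :=
  if h : low > high then none
  else
    let mid := PySem.Int.floordiv (low + high) 2
    let w := PySem.List.pyGetD xs mid ""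
    if w == tw then some w
    else if w < tw then bsFindB xs tw (mid + 1) high
    else bsFindB xs tw low (mid - 1)
termination_by (high + 1 - low).toNat
decreasing_by
  · have := PySem.Int.floordiv_two_mid_bounds (show low ≤ high by omega); omega
  · have := PySem.Int.floordiv_two_mid_bounds (show low ≤ high by omega); omega

def binary_search_and_check_vowel_alt (sorted_word_list : List String) (target_word : String) :
    Bool × Option Bool :=
  match bsFindB sorted_word_list target_word 0 ((sorted_word_list.length : Int) - 1) with
  | none => (false, none)
  | some w => (true, hasVowelB w)

-- ===== PRECONDITION & SPEC =====
def Spec_binary_search_and_check_vowel (sorted_word_list : List String) (target_word : String) (out : Bool × Option Bool) : Prop := out = binary_search_and_check_vowel_alt sorted_word_list target_word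
instance (sorted_word_list : List String) (target_word : String) (out : Bool × Option Bool) : Decidable (Spec_binary_search_and_check_vowel sorted_word_list target_word out) := by unfold Spec_binary_search_and_check_vowel; infer_instance

-- ===== CLAIM (what is proved, stated in full; the proofs are below) =====
def Claim_equal_binary_search_and_check_vowel : Prop := ∀ (sorted_word_list : List String) (target_word : String), Dom_binary_search_and_check_vowel sorted_word_list target_word → Spec_binary_search_and_check_vowel sorted_word_list target_word (binary_search_and_check_vowel sorted_word_list target_word)

-- ===== LEMMAS AND PROOFS =====

theorem hasVowel_eq (w : String) : hasVowelA w = hasVowelB w := by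
  unfold hasVowelA hasVowelB
  induction (PySem.Str.lower w).toList with
  | nil => rfl
  | cons c cs ih =>
      simp only [hasVowelLoopA, List.any_cons, ← ih]
      by_cases hc : c ∈ "aeiou".toList
      · simp [hc]
      · simp [hc]

theorem loop_eq_find (xs : List String) (tw : String) (low high : Int) :
    bscvLoopA xs tw low high =
      match bsFindB xs tw low high with
      | none => (false, none)
      | some w => (true, hasVowelB w) := by
  fun_induction bscvLoopA xs tw low high with
  | case1 low high h mid stranger hit =>
      rw [bsFindB, dif_neg (show ¬ low > high by omega), if_pos hit]
      exact congrArg (fun b => (true, some b)) (hasVowel_eq _)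
  | case2 low high h mid stranger hne hlt ih =>
      rw [bsFindB, dif_neg (show ¬ low > high by omega), if_neg hne, if_pos hlt]
      exact ih
  | case3 low high h mid stranger hne hge ih =>
      rw [bsFindB, dif_neg (show ¬ low > high by omega), if_neg hne, if_neg hge]
      exact ih
  | case4 low high h =>
      rw [bsFindB, dif_pos (show low > high by omega)]

-- ===== VERDICT (by name: the statement is the Claim_ definition above) =====
theorem binary_search_and_check_vowel_spec : Claim_equal_binary_search_and_check_vowel := by
  intro xs tw _
  unfold Spec_binary_search_and_check_vowel binary_search_and_check_vowel
    binary_search_and_check_vowel_alt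
  exact loop_eq_find xs tw 0 ((xs.length : Int) - 1)
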